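-- pv_equiv track=rewrite | github.com/hussamsalamh/image_processing | fill_id_number.py | findIDPos
-- ===== SOURCE A (Python) =====
-- ID_LENGTH = 8
--
-- def findIDPos(y_axis):
--     diff = y_axis[1][0] - y_axis[0][1]
--     h = y_axis[0][1] - y_axis[0][0]
--     end = y_axis[0][1]
--     start = y_axis[0][0]
--     y_arr = []
--     for i in range(ID_LENGTH):
--         y_arr.append((start, end))
--         end = start - diff
--         start = end - h
--     return y_arr
-- ===== SOURCE B (Python) =====
-- ID_LENGTH = 8
--
-- def findIDPos(y_axis):
--     start0, end0 = y_axis[0]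
--     h = end0 - start0
--     step = y_axis[1][0] - start0
--     return [(start0 - i * step, start0 - i * step + h) for i in range(ID_LENGTH)]
-- ===== Notes on version B (the rewrite author's own statement) =====
-- stated objective: simpler
-- what changed: Replaced the running two-variable (start,end) accumulator loop with a single list comprehension computing each pair independently from a closed-form index formula start0 - i*step with step = y_axis[1][0] - y_axis[0][0].
import Mathlib
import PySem

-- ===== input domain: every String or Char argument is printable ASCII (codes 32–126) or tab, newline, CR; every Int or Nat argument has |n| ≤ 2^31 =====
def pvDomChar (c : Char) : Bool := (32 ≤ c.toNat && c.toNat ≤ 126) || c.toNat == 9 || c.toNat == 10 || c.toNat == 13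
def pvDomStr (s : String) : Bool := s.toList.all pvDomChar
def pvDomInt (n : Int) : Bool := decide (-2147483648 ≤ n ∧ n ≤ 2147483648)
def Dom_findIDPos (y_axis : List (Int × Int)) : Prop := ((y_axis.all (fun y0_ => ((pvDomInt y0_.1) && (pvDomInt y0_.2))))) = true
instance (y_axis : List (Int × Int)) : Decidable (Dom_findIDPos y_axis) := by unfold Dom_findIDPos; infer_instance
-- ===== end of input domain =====

-- B replaces A's running (start, end) accumulator loop by a closed-form comprehension
-- over the index (objective: simpler); return values proved equal whenever len(y_axis) ≥ 2.

-- ===== PORT A =====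
def findIDPos (y_axis : List (Int × Int)) : List (Int × Int) :=
  let diff := (PySem.List.pyGetD y_axis 1 (0, 0)).1 - (PySem.List.pyGetD y_axis 0 (0, 0)).2
  let h := (PySem.List.pyGetD y_axis 0 (0, 0)).2 - (PySem.List.pyGetD y_axis 0 (0, 0)).1
  let endv := (PySem.List.pyGetD y_axis 0 (0, 0)).2
  let start := (PySem.List.pyGetD y_axis 0 (0, 0)).1
  let st := (PySem.List.pyRange 0 8 1).foldl
    (fun (s : Int × Int × List (Int × Int)) _ =>
      let y_arr := s.2.2 ++ [(s.1, s.2.1)]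
      let endv' := s.1 - diff
      let start' := endv' - h
      (start', endv', y_arr))
    (start, endv, [])
  st.2.2

-- ===== PORT B =====
def findIDPos_alt (y_axis : List (Int × Int)) : List (Int × Int) :=
  let p0 := PySem.List.pyGetD y_axis 0 (0, 0)
  let h := p0.2 - p0.1
  let step := (PySem.List.pyGetD y_axis 1 (0, 0)).1 - p0.1
  (PySem.List.pyRange 0 8 1).map (fun i => (p0.1 - i * step, p0.1 - i * step + h))

-- ===== PRECONDITION & SPEC =====
-- Pre_: Python A raises IndexError when y_axis has fewer than two elements (it reads y_axis[1]).
def Pre_findIDPos (y_axis : List (Int × Int)) : Prop := 2 ≤ y_axis.length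
instance (y_axis : List (Int × Int)) : Decidable (Pre_findIDPos y_axis) := by unfold Pre_findIDPos; infer_instance
def pvWitness_findIDPos : (List (Int × Int)) := [(0, 3), (10, 13)]

def Spec_findIDPos (y_axis : List (Int × Int)) (out : List (Int × Int)) : Prop := out = findIDPos_alt y_axis
instance (y_axis : List (Int × Int)) (out : List (Int × Int)) : Decidable (Spec_findIDPos y_axis out) := by unfold Spec_findIDPos; infer_instance

-- ===== CLAIM (what is proved, stated in full; the proofs are below) =====
def Claim_equal_findIDPos : Prop := ∀ (y_axis : List (Int × Int)), Dom_findIDPos y_axis → Pre_findIDPos y_axis → Spec_findIDPos y_axis (findIDPos y_axis)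

-- ===== LEMMAS AND PROOFS =====

-- ===== VERDICT (by name: the statement is the Claim_ definition above) =====
theorem findIDPos_spec : Claim_equal_findIDPos := by
  intro y_axis _ _
  unfold Spec_findIDPos findIDPos findIDPos_alt
  simp [PySem.List.pyRange, List.range_succ]
  ring_nf
  simp
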